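-- pv_equiv track=rewrite | github.com/marshimarocj/precision_recall | model/util.py | transform_predict_captionid_array_to_list
-- ===== SOURCE A (Python) =====
-- def transform_predict_captionid_array_to_list(captionids): # (None, step)
--   outs = []
--   for captionid in captionids:
--     out = [0]
--     for wid in captionid:
--       out.append(wid)
--       if wid == 1:
--         break
--     outs.append(out)
--
--   return outs
-- ===== SOURCE B (Python) =====
-- def transform_predict_captionid_array_to_list(captionids):
--   outs = []
--   for captionid in captionids:
--     cap = list(captionid)
--     idx = cap.index(1) + 1 if 1 in cap else len(cap)
--     outs.append([0] + cap[:idx])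
--   return outs
-- ===== Notes on version B (the rewrite author's own statement) =====
-- stated objective: simpler
-- what changed: Replaces the element-wise append/break inner loop with locating the end-token once via list.index and taking a single slice up to and including it.
import Mathlib
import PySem

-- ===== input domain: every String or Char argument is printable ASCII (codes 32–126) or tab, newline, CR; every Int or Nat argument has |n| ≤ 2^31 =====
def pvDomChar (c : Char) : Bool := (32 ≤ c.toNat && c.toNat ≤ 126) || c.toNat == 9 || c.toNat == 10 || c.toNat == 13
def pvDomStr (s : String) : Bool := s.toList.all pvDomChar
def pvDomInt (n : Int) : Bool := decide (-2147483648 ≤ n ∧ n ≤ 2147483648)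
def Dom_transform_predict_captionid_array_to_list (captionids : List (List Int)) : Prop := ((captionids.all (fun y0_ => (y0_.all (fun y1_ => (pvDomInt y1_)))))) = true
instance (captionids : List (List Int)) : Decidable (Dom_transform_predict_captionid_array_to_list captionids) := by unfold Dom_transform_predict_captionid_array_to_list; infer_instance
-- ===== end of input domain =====

-- B replaces the append/break inner loop by finding the end-token index once and slicing (objective: simpler).


-- ===== PORT A =====
-- inner loop of A: out starts as [0]; append each wid, stop right after appending a 1
def pvRowA (acc : List Int) : List Int → List Int
  | [] => acc
  | w :: ws => if w = 1 then acc ++ [w] else pvRowA (acc ++ [w]) ws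

def transform_predict_captionid_array_to_list (captionids : List (List Int)) : List (List Int) :=
  captionids.map (fun captionid => pvRowA [0] captionid)

-- ===== PORT B =====
-- B: cut point = index of the first 1 (inclusive) or the full row; one slice per row
def pvRowB (cap : List Int) : List Int :=
  let idx : Nat := match PySem.List.index? cap 1 with
    | some i => i + 1
    | none => cap.length
  0 :: PySem.List.slice cap none (some (idx : Int))

def transform_predict_captionid_array_to_list_alt (captionids : List (List Int)) : List (List Int) :=
  captionids.map pvRowB

-- ===== PRECONDITION & SPEC =====
def Spec_transform_predict_captionid_array_to_list (captionids : List (List Int)) (out : List (List Int)) : Prop := out = transform_predict_captionid_array_to_list_alt captionids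
instance (captionids : List (List Int)) (out : List (List Int)) : Decidable (Spec_transform_predict_captionid_array_to_list captionids out) := by unfold Spec_transform_predict_captionid_array_to_list; infer_instance

-- ===== CLAIM (what is proved, stated in full; the proofs are below) =====
def Claim_equal_transform_predict_captionid_array_to_list : Prop := ∀ (captionids : List (List Int)), Dom_transform_predict_captionid_array_to_list captionids → Spec_transform_predict_captionid_array_to_list captionids (transform_predict_captionid_array_to_list captionids)

-- ===== LEMMAS AND PROOFS =====

-- ===== VERDICT (by name: the statement is the Claim_ definition above) =====
def pvIdx (cap : List Int) : Nat :=
  match PySem.List.index? cap 1 with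
  | some i => i + 1
  | none => cap.length

lemma pvRowA_take (cap : List Int) : ∀ acc, pvRowA acc cap = acc ++ cap.take (pvIdx cap) := by
  induction cap with
  | nil => intro acc; simp [pvRowA, pvIdx]
  | cons w ws ih =>
    intro acc
    by_cases hw : w = 1
    · subst hw
      have h1 : pvIdx (1 :: ws) = 1 := by
        unfold pvIdx; rw [PySem.List.index?_cons_self]
      simp [pvRowA, h1]
    · have hidx : pvIdx (w :: ws) = pvIdx ws + 1 := by
        unfold pvIdx
        rw [PySem.List.index?_cons_of_ne ws hw]
        cases PySem.List.index? ws 1 <;> simp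
      simp only [pvRowA, if_neg hw, ih, hidx, List.take_succ_cons,
        List.append_assoc, List.singleton_append]

lemma pvRowB_eq (cap : List Int) : pvRowB cap = 0 :: cap.take (pvIdx cap) := by
  simp only [pvRowB, pvIdx]
  rw [PySem.List.slice_to_natCast]

theorem transform_predict_captionid_array_to_list_spec : Claim_equal_transform_predict_captionid_array_to_list := by
  intro captionids _
  unfold Spec_transform_predict_captionid_array_to_list
  unfold transform_predict_captionid_array_to_list transform_predict_captionid_array_to_list_alt
  refine List.map_congr_left ?_
  intro cap _
  rw [pvRowB_eq, pvRowA_take]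
  rfl
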